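-- pv_equiv track=rewrite | github.com/becevior/imperial_map | backend/ingest_games.py | group_games_by_week
-- ===== SOURCE A (Python) =====
-- from collections import defaultdict
-- from typing import Dict, Iterable, List, Optional, Tuple
--
-- def group_games_by_week(games: Iterable[Dict]) -> Dict[int, List[Dict]]:
--     buckets: Dict[int, List[Dict]] = defaultdict(list)
--     for game in games:
--         week = int(game.get('week') or 0)
--         buckets[week].append(game)
--
--     for entries in buckets.values():
--         entries.sort(key=lambda g: (g.get('sortKey') or '', g.get('id') or ''))
--
--     return buckets
-- ===== SOURCE B (Python) =====
-- from collections import defaultdict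
-- from typing import Dict, Iterable, List
--
--
-- def group_games_by_week(games: Iterable[Dict]) -> Dict[int, List[Dict]]:
--     games = list(games)
--     # distinct week keys in first-occurrence order
--     weeks = list(dict.fromkeys(int(g.get('week') or 0) for g in games))
--     # sort the whole list once; each bucket is then a filter of this sorted list
--     s = sorted(games, key=lambda g: (g.get('sortKey') or '', g.get('id') or ''))
--     return defaultdict(
--         list,
--         {w: [g for g in s if int(g.get('week') or 0) == w] for w in weeks},
--     )
-- ===== Notes on version B (the rewrite author's own statement) =====
-- stated objective: alternative
-- what changed: B replaces A's bucket-append-then-sort-each-bucket dict mutation with a global one-time sort plus, for each distinct week (first-occurrence order), a filter of the sorted list; stability of the sort makes each filtered bucket equal A's per-bucket sort.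
import Mathlib
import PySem

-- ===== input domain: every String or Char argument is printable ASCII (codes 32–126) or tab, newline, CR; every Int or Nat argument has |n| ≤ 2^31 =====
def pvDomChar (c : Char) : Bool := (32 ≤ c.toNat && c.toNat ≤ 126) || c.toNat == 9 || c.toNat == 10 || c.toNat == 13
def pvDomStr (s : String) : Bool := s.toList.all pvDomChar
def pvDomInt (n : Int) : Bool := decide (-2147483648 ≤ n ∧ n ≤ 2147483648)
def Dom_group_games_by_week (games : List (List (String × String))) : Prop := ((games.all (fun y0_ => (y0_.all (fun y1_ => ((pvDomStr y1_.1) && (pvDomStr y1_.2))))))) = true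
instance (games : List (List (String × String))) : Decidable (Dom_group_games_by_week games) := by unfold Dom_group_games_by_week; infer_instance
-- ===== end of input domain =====

-- B replaces A's bucket-then-sort-each-bucket dict mutation by a single global sort plus,
-- per distinct week (first-occurrence order), a filter of the sorted list (objective: alternative).

-- ===== PORT A =====
-- int(game.get('week') or 0): a missing key and '' give 0; under Pre_ the parse succeeds
def pvWeek (game : List (String × String)) : Int :=
  if (PySem.Dict.ofList game).getD "week" "" = "" then 0
  else (PySem.Int.ofStr? ((PySem.Dict.ofList game).getD "week" "")).getD 0

-- g.get('sortKey') or ''  /  g.get('id') or ''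
def pvKey1 (g : List (String × String)) : String := (PySem.Dict.ofList g).getD "sortKey" ""
def pvKey2 (g : List (String × String)) : String := (PySem.Dict.ofList g).getD "id" ""

def group_games_by_week (games : List (List (String × String))) : List (Int × List (List (String × String))) :=
  -- for game in games: buckets[int(game.get('week') or 0)].append(game)   (defaultdict(list))
  -- then: for entries in buckets.values(): entries.sort(key=...)
  ((games.foldl (fun d g => d.modify (pvWeek g) [] (fun v => v ++ [g])) PySem.Dict.empty).items.map
    (fun p => (p.1, PySem.List.sorted2 p.2 pvKey1 pvKey2)))

-- ===== PORT B =====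
-- weeks = list(dict.fromkeys(int(g.get('week') or 0) for g in games))
-- s = sorted(games, key=...); {w: [g for g in s if week(g) == w] for w in weeks}
def group_games_by_week_alt (games : List (List (String × String))) : List (Int × List (List (String × String))) :=
  let s := PySem.List.sorted2 games pvKey1 pvKey2
  (PySem.List.dedup (games.map pvWeek)).map
    (fun w => (w, s.filter (fun g => pvWeek g == w)))

-- ===== PRECONDITION & SPEC =====
-- Pre_ excludes exactly the inputs on which Python's int() raises ValueError: a game whose
-- 'week' value is a non-empty string that does not parse as an integer (A returns nowhere there).
def Pre_group_games_by_week (games : List (List (String × String))) : Prop :=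
  ∀ g ∈ games, ((PySem.Dict.ofList g).getD "week" "") = "" ∨
    (PySem.Int.ofStr? ((PySem.Dict.ofList g).getD "week" "")).isSome
instance (games : List (List (String × String))) : Decidable (Pre_group_games_by_week games) := by unfold Pre_group_games_by_week; infer_instance

def pvWitness_group_games_by_week : (List (List (String × String))) :=
  [[("week", "2"), ("id", "b"), ("sortKey", "x")], [("id", "a")], [("week", " 2 "), ("id", "c")]]

def Spec_group_games_by_week (games : List (List (String × String))) (out : List (Int × List (List (String × String)))) : Prop := out = group_games_by_week_alt games
instance (games : List (List (String × String))) (out : List (Int × List (List (String × String)))) : Decidable (Spec_group_games_by_week games out) := by unfold Spec_group_games_by_week; infer_instance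

-- ===== CLAIM (what is proved, stated in full; the proofs are below) =====
def Claim_equal_group_games_by_week : Prop := ∀ (games : List (List (String × String))), Dom_group_games_by_week games → Pre_group_games_by_week games → Spec_group_games_by_week games (group_games_by_week games)

-- ===== LEMMAS AND PROOFS =====

-- the strict 'before' comparison used by Python's sort on the key tuple (k1 x, k2 x)
def pvBfor {α : Type} (k1 k2 : α → String) (a b : α) : Bool :=
  decide (k1 a < k1 b) || (!decide (k1 b < k1 a) && decide (k2 a < k2 b))

theorem pvBfor_true_iff {α : Type} (k1 k2 : α → String) (a b : α) :
    pvBfor k1 k2 a b = true ↔ (k1 a < k1 b ∨ (k1 a ≤ k1 b ∧ k2 a < k2 b)) := by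
  simp [pvBfor, not_lt]

theorem pvBfor_asymm {α : Type} (k1 k2 : α → String) {a b : α}
    (h : pvBfor k1 k2 a b = true) : pvBfor k1 k2 b a = false := by
  rw [pvBfor_true_iff] at h
  rw [Bool.eq_false_iff]
  intro h'
  rw [pvBfor_true_iff] at h'
  rcases h with h | ⟨h1, h2⟩ <;> rcases h' with g | ⟨g1, g2⟩
  · exact lt_asymm h g
  · exact absurd h (not_lt.mpr g1)
  · exact absurd g (not_lt.mpr h1)
  · exact lt_asymm h2 g2

theorem pvBfor_trans {α : Type} (k1 k2 : α → String) {a b c : α}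
    (hab : pvBfor k1 k2 a b = true) (hbc : pvBfor k1 k2 b c = true) :
    pvBfor k1 k2 a c = true := by
  rw [pvBfor_true_iff] at hab hbc ⊢
  rcases hab with h | ⟨h1, h2⟩ <;> rcases hbc with g | ⟨g1, g2⟩
  · exact Or.inl (lt_trans h g)
  · exact Or.inl (lt_of_lt_of_le h g1)
  · exact Or.inl (lt_of_le_of_lt h1 g)
  · rcases lt_or_ge (k1 a) (k1 c) with hlt | _
    · exact Or.inl hlt
    · exact Or.inr ⟨le_trans h1 g1, lt_trans h2 g2⟩

-- key x < key y ≤ key z  (z not strictly below y)  gives  key x < key z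
theorem pvBfor_lt_of_not {α : Type} (k1 k2 : α → String) {x y z : α}
    (hxy : pvBfor k1 k2 x y = true) (hzy : pvBfor k1 k2 z y = false) :
    pvBfor k1 k2 x z = true := by
  rw [pvBfor_true_iff] at hxy ⊢
  rw [Bool.eq_false_iff] at hzy
  have hz : ¬(k1 z < k1 y ∨ (k1 z ≤ k1 y ∧ k2 z < k2 y)) :=
    fun hc => hzy ((pvBfor_true_iff k1 k2 z y).mpr hc)
  push_neg at hz
  obtain ⟨hz1, hz2⟩ := hz
  rcases hxy with h | ⟨h1, h2⟩
  · exact Or.inl (lt_of_lt_of_le h hz1)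
  · rcases lt_or_ge (k1 x) (k1 z) with hlt | hle
    · exact Or.inl hlt
    · have hzy' : k1 z ≤ k1 y := le_trans hle h1
      have h2' : k2 y ≤ k2 z := not_lt.mp (hz2 hzy')
      exact Or.inr ⟨le_trans h1 hz1, lt_of_lt_of_le h2 h2'⟩

theorem insertBy_cons_of_forall {α : Type} (before : α → α → Bool) (x : α) (l : List α)
    (h : ∀ z ∈ l, before x z = true) : PySem.List.insertBy before x l = x :: l := by
  cases l with
  | nil => simp [PySem.List.insertBy]
  | cons y t =>
    have hy := h y List.mem_cons_self
    simp [PySem.List.insertBy, hy]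

theorem pairwise_insertBy {α : Type} (k1 k2 : α → String) (x : α) {ys : List α}
    (h : ys.Pairwise (fun a b => pvBfor k1 k2 b a = false)) :
    (PySem.List.insertBy (pvBfor k1 k2) x ys).Pairwise (fun a b => pvBfor k1 k2 b a = false) := by
  induction ys with
  | nil => simp [PySem.List.insertBy]
  | cons y t ih =>
    rw [List.pairwise_cons] at h
    obtain ⟨hy, ht⟩ := h
    by_cases hxy : pvBfor k1 k2 x y = true
    · rw [show PySem.List.insertBy (pvBfor k1 k2) x (y :: t) = x :: y :: t from by
        simp [PySem.List.insertBy, hxy]]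
      refine List.Pairwise.cons ?_ (List.Pairwise.cons hy ht)
      intro m hm
      rcases List.mem_cons.mp hm with rfl | hm
      · exact pvBfor_asymm k1 k2 hxy
      · rw [Bool.eq_false_iff]
        intro hmx
        have hmy := pvBfor_trans k1 k2 hmx hxy
        rw [hy m hm] at hmy
        exact Bool.false_ne_true hmy
    · have hxy' : pvBfor k1 k2 x y = false := Bool.eq_false_iff.mpr hxy
      rw [show PySem.List.insertBy (pvBfor k1 k2) x (y :: t) =
          y :: PySem.List.insertBy (pvBfor k1 k2) x t from by
        simp [PySem.List.insertBy, hxy']]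
      refine List.Pairwise.cons ?_ (ih ht)
      intro m hm
      rcases (PySem.List.mem_insertBy _ _ _ _).mp hm with rfl | hm
      · exact hxy'
      · exact hy m hm

theorem filter_insertBy {α : Type} (k1 k2 : α → String) (p : α → Bool) (x : α) {ys : List α}
    (h : ys.Pairwise (fun a b => pvBfor k1 k2 b a = false)) :
    (PySem.List.insertBy (pvBfor k1 k2) x ys).filter p =
      if p x then PySem.List.insertBy (pvBfor k1 k2) x (ys.filter p) else ys.filter p := by
  induction ys with
  | nil => by_cases hp : p x <;> simp [PySem.List.insertBy, hp]
  | cons y t ih =>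
    rw [List.pairwise_cons] at h
    obtain ⟨hy, ht⟩ := h
    by_cases hxy : pvBfor k1 k2 x y = true
    · rw [show PySem.List.insertBy (pvBfor k1 k2) x (y :: t) = x :: y :: t from by
        simp [PySem.List.insertBy, hxy]]
      by_cases hp : p x
      · rw [if_pos hp]
        have hall : ∀ z ∈ (y :: t).filter p, pvBfor k1 k2 x z = true := by
          intro z hz
          have hz' := List.mem_of_mem_filter hz
          rcases List.mem_cons.mp hz' with rfl | hz''
          · exact hxy
          · exact pvBfor_lt_of_not k1 k2 hxy (hy z hz'')
        rw [insertBy_cons_of_forall _ _ _ hall]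
        simp [List.filter_cons, hp]
      · rw [if_neg hp]
        simp [hp]
    · have hxy' : pvBfor k1 k2 x y = false := Bool.eq_false_iff.mpr hxy
      rw [show PySem.List.insertBy (pvBfor k1 k2) x (y :: t) =
          y :: PySem.List.insertBy (pvBfor k1 k2) x t from by
        simp [PySem.List.insertBy, hxy']]
      by_cases hp : p x <;> by_cases hpy : p y <;>
        simp [hp, hpy, ih ht, PySem.List.insertBy, hxy']

theorem filter_foldl_insertBy {α : Type} (k1 k2 : α → String) (p : α → Bool) :
    ∀ (xs acc : List α), acc.Pairwise (fun a b => pvBfor k1 k2 b a = false) →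
      (xs.foldl (fun a x => PySem.List.insertBy (pvBfor k1 k2) x a) acc).filter p =
        (xs.filter p).foldl (fun a x => PySem.List.insertBy (pvBfor k1 k2) x a) (acc.filter p) := by
  intro xs
  induction xs with
  | nil => intro acc _; simp
  | cons x xs ih =>
    intro acc hacc
    rw [List.foldl_cons, ih _ (pairwise_insertBy k1 k2 x hacc), filter_insertBy k1 k2 p x hacc]
    by_cases hp : p x <;> simp [hp]

theorem sorted2_eq_foldl {α : Type} (xs : List α) (k1 k2 : α → String) :
    PySem.List.sorted2 xs k1 k2 = xs.foldl (fun a x => PySem.List.insertBy (pvBfor k1 k2) x a) [] := rfl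

-- stability: sorting then filtering is filtering then sorting
theorem sorted2_filter {α : Type} (xs : List α) (p : α → Bool) (k1 k2 : α → String) :
    PySem.List.sorted2 (xs.filter p) k1 k2 = (PySem.List.sorted2 xs k1 k2).filter p := by
  rw [sorted2_eq_foldl, sorted2_eq_foldl, filter_foldl_insertBy k1 k2 p xs [] (List.Pairwise.nil)]
  simp

-- bucket-filling loop: what each bucket holds
theorem getD_bucket (l : List (List (String × String)))
    (d : PySem.Dict Int (List (List (String × String)))) (k : Int) :
    (l.foldl (fun d g => d.modify (pvWeek g) [] (fun v => v ++ [g])) d).getD k [] =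
      d.getD k [] ++ l.filter (fun g => pvWeek g == k) := by
  induction l generalizing d with
  | nil => simp
  | cons g t ih =>
    rw [List.foldl_cons, ih]
    by_cases h : k = pvWeek g
    · simp [h]
    · have h' : ¬ pvWeek g = k := fun hh => h hh.symm
      simp [PySem.Dict.getD_modify, h, h']

-- A's result, characterised: one pair per distinct week, bucket = sorted filter
theorem portA_eq (games : List (List (String × String))) :
    group_games_by_week games =
      (PySem.Set.ofList (games.map pvWeek)).map
        (fun k => (k, PySem.List.sorted2 (games.filter (fun g => pvWeek g == k)) pvKey1 pvKey2)) := by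
  unfold group_games_by_week
  have hnodup : (games.foldl (fun d g => d.modify (pvWeek g) [] (fun v => v ++ [g]))
      PySem.Dict.empty).keys.Nodup := by
    simpa using PySem.Dict.nodup_keys_foldl_modify_key (l := games) (key := pvWeek)
      (d0 := ([] : List (List (String × String)))) (f := fun _ g v => v ++ [g])
      (d := PySem.Dict.empty) PySem.Dict.nodup_keys_empty
  have hkeys : (games.foldl (fun d g => d.modify (pvWeek g) [] (fun v => v ++ [g]))
      PySem.Dict.empty).keys = PySem.Set.ofList (games.map pvWeek) := by
    simpa [PySem.Dict.keys_empty, PySem.Set.update_nil_left] using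
      PySem.Dict.keys_foldl_modify_key (l := games) (key := pvWeek)
        (d0 := ([] : List (List (String × String)))) (f := fun _ g v => v ++ [g])
        (d := PySem.Dict.empty)
  rw [PySem.Dict.items_eq_map_keys _ hnodup [], hkeys, List.map_map]
  refine List.map_congr_left ?_
  intro k _
  simp [Function.comp, getD_bucket games PySem.Dict.empty k]

-- ===== VERDICT (by name: the statement is the Claim_ definition above) =====
theorem group_games_by_week_spec : Claim_equal_group_games_by_week := by
  intro games _ _
  unfold Spec_group_games_by_week group_games_by_week_alt
  rw [portA_eq]
  simp only [PySem.List.dedup_eq_ofList]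
  refine List.map_congr_left ?_
  intro k _
  exact congrArg (fun z => (k, z))
    (sorted2_filter games (fun g => pvWeek g == k) pvKey1 pvKey2)
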